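-- pv_equiv track=rewrite | github.com/HaloSense/EL6463-projects | hw3_testbench/test cases generating scripts/lines_gen.py | lines_gen_up
-- ===== SOURCE A (Python) =====
-- def lines_gen_up(mode, cnt_in, for_period):
--     line = ''
--     lines = []
--
--     rst = '0'
--     en = '0'
--     cnt = cnt_in
--
--     for i in range(for_period):
--         if mode == 're':
--             rst = '1'
--             en = '1'
--             cnt = 1
--
--         if mode == 'r':
--             rst = '1'
--             en = '0'
--             cnt = 1
--
--         if mode == 'e':
--             rst = '0'
--             en = '1'
--             cnt += 1
--             if cnt == 65536:
--                 cnt = 0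
--
--         if mode == 'x':
--             rst = '0'
--             en = '0'
--
--         cnt_out = '{:016b}'.format(cnt)
--         line = ",".join((rst, en, cnt_out))
--         line = "".join((line, "\n"))
--
--         lines.append(line)
--
--     return lines, cnt
-- ===== SOURCE B (Python) =====
-- def lines_gen_up(mode, cnt_in, for_period):
--     if for_period <= 0:
--         return [], cnt_in
--     if mode == 'e':
--         lines = []
--         cnt = cnt_in
--         for _ in range(for_period):
--             cnt = 0 if cnt + 1 == 65536 else cnt + 1
--             lines.append(f'0,1,{cnt:016b}\n')
--         return lines, cnt
--     if mode == 're' or mode == 'r':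
--         en = '1' if mode == 're' else '0'
--         return [f'1,{en},{1:016b}\n'] * for_period, 1
--     return [f'0,0,{cnt_in:016b}\n'] * for_period, cnt_in
-- ===== Notes on version B (the rewrite author's own statement) =====
-- stated objective: simpler
-- what changed: B dispatches on the mode before looping: for 're'/'r'/'x' and unmatched modes the emitted line is constant, so B formats it once and replicates it for_period times; only mode 'e' keeps a loop with the exact stepwise wrap at 65536.
import Mathlib
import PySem

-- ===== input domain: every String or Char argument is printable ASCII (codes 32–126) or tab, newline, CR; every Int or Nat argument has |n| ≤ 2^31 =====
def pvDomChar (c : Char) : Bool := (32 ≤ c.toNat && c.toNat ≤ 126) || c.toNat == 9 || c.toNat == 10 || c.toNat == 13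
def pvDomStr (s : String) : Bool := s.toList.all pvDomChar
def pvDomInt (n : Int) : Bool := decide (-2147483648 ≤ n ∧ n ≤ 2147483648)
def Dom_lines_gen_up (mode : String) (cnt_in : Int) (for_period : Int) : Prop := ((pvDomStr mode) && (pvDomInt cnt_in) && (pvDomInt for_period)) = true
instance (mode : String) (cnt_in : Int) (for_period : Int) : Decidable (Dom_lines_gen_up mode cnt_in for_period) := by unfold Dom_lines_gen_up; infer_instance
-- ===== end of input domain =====

-- B hoists the mode dispatch out of the loop: every mode except 'e' emits one fixed line
-- replicated for_period times, so only 'e' keeps a loop (objective: simpler; return value only).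

-- '{:016b}'.format(n)  (shared formatting builtin)
def pvFmt (n : Int) : String := PySem.Str.zfill (PySem.Int.toBin n) 16

-- ===== PORT A =====
def lines_gen_up (mode : String) (cnt_in : Int) (for_period : Int) : List String × Int :=
  let st := (PySem.List.pyRange 0 for_period 1).foldl (fun (st : String × String × Int × List String) _ =>
    let rst := st.1; let en := st.2.1; let cnt := st.2.2.1; let lines := st.2.2.2
    let (rst, en, cnt) := if mode == "re" then ("1", "1", (1 : Int)) else (rst, en, cnt)
    let (rst, en, cnt) := if mode == "r" then ("1", "0", (1 : Int)) else (rst, en, cnt)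
    let (rst, en, cnt) := if mode == "e" then
        ("0", "1", if cnt + 1 == 65536 then (0 : Int) else cnt + 1) else (rst, en, cnt)
    let (rst, en) := if mode == "x" then ("0", "0") else (rst, en)
    let cnt_out := pvFmt cnt
    let line := PySem.Str.join "," [rst, en, cnt_out]
    let line := PySem.Str.join "" [line, "\n"]
    (rst, en, cnt, lines ++ [line])) ("0", "0", cnt_in, ([] : List String))
  (st.2.2.2, st.2.2.1)

-- ===== PORT B =====
def lines_gen_up_alt (mode : String) (cnt_in : Int) (for_period : Int) : List String × Int :=
  if for_period ≤ 0 then ([], cnt_in)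
  else if mode == "e" then
    (PySem.List.pyRange 0 for_period 1).foldl (fun (p : List String × Int) _ =>
      let cnt := if p.2 + 1 == 65536 then (0 : Int) else p.2 + 1
      (p.1 ++ [PySem.Str.join "" ["0,1,", pvFmt cnt, "\n"]], cnt)) (([] : List String), cnt_in)
  else if mode == "re" || mode == "r" then
    let en := if mode == "re" then "1" else "0"
    (List.replicate for_period.toNat (PySem.Str.join "" ["1,", en, ",", pvFmt 1, "\n"]), 1)
  else
    (List.replicate for_period.toNat (PySem.Str.join "" ["0,0,", pvFmt cnt_in, "\n"]), cnt_in)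

-- ===== PRECONDITION & SPEC =====
def Spec_lines_gen_up (mode : String) (cnt_in : Int) (for_period : Int) (out : List String × Int) : Prop := out = lines_gen_up_alt mode cnt_in for_period
instance (mode : String) (cnt_in : Int) (for_period : Int) (out : List String × Int) : Decidable (Spec_lines_gen_up mode cnt_in for_period out) := by unfold Spec_lines_gen_up; infer_instance

-- ===== CLAIM (what is proved, stated in full; the proofs are below) =====
def Claim_equal_lines_gen_up : Prop := ∀ (mode : String) (cnt_in : Int) (for_period : Int), Dom_lines_gen_up mode cnt_in for_period → Spec_lines_gen_up mode cnt_in for_period (lines_gen_up mode cnt_in for_period)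

-- ===== LEMMAS AND PROOFS =====

-- the four line-string shapes agree with B's f-string decomposition
theorem pv_line_re (x : String) :
    PySem.Str.join "" [PySem.Str.join "," ["1", "1", x], "\n"] =
    PySem.Str.join "" ["1,", "1", ",", x, "\n"] := by
  simp [PySem.Str.join, PySem.Chars.join, List.intercalate]

theorem pv_line_r (x : String) :
    PySem.Str.join "" [PySem.Str.join "," ["1", "0", x], "\n"] =
    PySem.Str.join "" ["1,", "0", ",", x, "\n"] := by
  simp [PySem.Str.join, PySem.Chars.join, List.intercalate]

theorem pv_line_e (x : String) :
    PySem.Str.join "" [PySem.Str.join "," ["0", "1", x], "\n"] =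
    PySem.Str.join "" ["0,1,", x, "\n"] := by
  simp [PySem.Str.join, PySem.Chars.join, List.intercalate]

theorem pv_line_x (x : String) :
    PySem.Str.join "" [PySem.Str.join "," ["0", "0", x], "\n"] =
    PySem.Str.join "" ["0,0,", x, "\n"] := by
  simp [PySem.Str.join, PySem.Chars.join, List.intercalate]

-- a fold whose step ignores registers and appends one fixed line L
theorem pv_foldl_const (r e : String) (c : Int) (L : String) :
    ∀ (l : List Int) (st : String × String × Int × List String),
      l.foldl (fun st (_ : Int) => (r, e, c, st.2.2.2 ++ [L])) st =
        (if l.length = 0 then st else (r, e, c, st.2.2.2 ++ List.replicate l.length L)) := by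
  intro l
  induction l with
  | nil => intro st; simp
  | cons x xs ih =>
      intro st
      rw [List.foldl_cons, ih]
      by_cases hx : xs.length = 0 <;>
        simp [hx, List.replicate_succ, List.append_assoc]

-- a fold whose step keeps all registers and appends the line of the kept cnt
theorem pv_foldl_keep :
    ∀ (l : List Int) (st : String × String × Int × List String),
      l.foldl (fun st (_ : Int) => (st.1, st.2.1, st.2.2.1, st.2.2.2 ++
          [PySem.Str.join "" [PySem.Str.join "," [st.1, st.2.1, pvFmt st.2.2.1], "\n"]])) st =
        (st.1, st.2.1, st.2.2.1, st.2.2.2 ++ List.replicate l.length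
          (PySem.Str.join "" [PySem.Str.join "," [st.1, st.2.1, pvFmt st.2.2.1], "\n"])) := by
  intro l
  induction l with
  | nil => intro st; simp
  | cons x xs ih =>
      intro st
      rw [List.foldl_cons, ih]
      simp [List.replicate_succ, List.append_assoc]

-- the 'x' fold: registers forced to "0","0", cnt kept
theorem pv_foldl_x :
    ∀ (l : List Int) (st : String × String × Int × List String),
      l.foldl (fun st (_ : Int) => ("0", "0", st.2.2.1, st.2.2.2 ++
          [PySem.Str.join "" [PySem.Str.join "," ["0", "0", pvFmt st.2.2.1], "\n"]])) st =
        (if l.length = 0 then st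
         else ("0", "0", st.2.2.1, st.2.2.2 ++ List.replicate l.length
          (PySem.Str.join "" [PySem.Str.join "," ["0", "0", pvFmt st.2.2.1], "\n"]))) := by
  intro l
  induction l with
  | nil => intro st; simp
  | cons x xs ih =>
      intro st
      rw [List.foldl_cons, ih]
      by_cases hx : xs.length = 0 <;>
        simp [hx, List.replicate_succ, List.append_assoc]

-- the 'e' fold of A, projected to (lines, cnt), is B's 'e' fold
theorem pv_foldl_e :
    ∀ (l : List Int) (st : String × String × Int × List String),
      ((l.foldl (fun st (_ : Int) =>
          ("0", "1", if st.2.2.1 + 1 == 65536 then (0 : Int) else st.2.2.1 + 1,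
           st.2.2.2 ++ [PySem.Str.join "" [PySem.Str.join ","
             ["0", "1", pvFmt (if st.2.2.1 + 1 == 65536 then (0 : Int) else st.2.2.1 + 1)], "\n"]])) st).2.2.2,
       (l.foldl (fun st (_ : Int) =>
          ("0", "1", if st.2.2.1 + 1 == 65536 then (0 : Int) else st.2.2.1 + 1,
           st.2.2.2 ++ [PySem.Str.join "" [PySem.Str.join ","
             ["0", "1", pvFmt (if st.2.2.1 + 1 == 65536 then (0 : Int) else st.2.2.1 + 1)], "\n"]])) st).2.2.1) =
      l.foldl (fun (p : List String × Int) (_ : Int) =>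
          (p.1 ++ [PySem.Str.join "" ["0,1,",
             pvFmt (if p.2 + 1 == 65536 then (0 : Int) else p.2 + 1), "\n"]],
           if p.2 + 1 == 65536 then (0 : Int) else p.2 + 1)) (st.2.2.2, st.2.2.1) := by
  intro l
  induction l with
  | nil => intro st; simp
  | cons x xs ih =>
      intro st
      rw [List.foldl_cons, List.foldl_cons, ih]
      simp [pv_line_e]

-- ===== VERDICT (by name: the statement is the Claim_ definition above) =====
theorem lines_gen_up_spec : Claim_equal_lines_gen_up := by
  intro mode cnt_in for_period _
  unfold Spec_lines_gen_up lines_gen_up lines_gen_up_alt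
  by_cases hp : for_period ≤ 0
  · rw [PySem.List.pyRange_one_eq_nil hp]
    simp [hp]
  · have hlen : (PySem.List.pyRange 0 for_period 1).length = for_period.toNat := by
      rw [PySem.List.length_pyRange_one]; norm_num
    have hn0 : ¬ for_period.toNat = 0 := by omega
    by_cases hre : mode = "re"
    · subst hre
      simp only [String.reduceBEq, beq_self_eq_true, if_true, Bool.false_eq_true, if_false]
      rw [pv_foldl_const]
      simp [hlen, hn0, pv_line_re, hp]
    · by_cases hr : mode = "r"
      · subst hr
        simp only [String.reduceBEq, beq_self_eq_true, if_true, Bool.false_eq_true, if_false]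
        rw [pv_foldl_const]
        simp [hlen, hn0, pv_line_r, hp]
      · by_cases he : mode = "e"
        · subst he
          simp only [String.reduceBEq, beq_self_eq_true, if_true, Bool.false_eq_true, if_false]
          rw [pv_foldl_e]
          simp [hp]
        · have hre' := beq_eq_false_iff_ne.mpr hre
          have hr' := beq_eq_false_iff_ne.mpr hr
          have he' := beq_eq_false_iff_ne.mpr he
          by_cases hx : mode = "x"
          · subst hx
            simp only [String.reduceBEq, beq_self_eq_true, if_true, Bool.false_eq_true, if_false]
            rw [pv_foldl_x]
            simp [hlen, hn0, pv_line_x, hp]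
          · have hx' := beq_eq_false_iff_ne.mpr hx
            simp only [hre', hr', he', hx', Bool.false_eq_true, if_false]
            rw [pv_foldl_keep]
            simp [hlen, pv_line_x, hp]
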